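-- pv_equiv track=rewrite | github.com/dev-andalib/COMPUTER-GRAPHICS | CATCH THE DIAMOND/other.py | zone_readjust
-- ===== SOURCE A (Python) =====
-- def zone_readjust(p1, zone):
--     if zone == 1:
--         return [p1[1], p1[0]]
--     elif zone == 2:
--         x, y = zone_readjust(p1, 1)
--         return [-x, y]
--     elif zone == 3:
--         return [-p1[0], p1[1]]
--     elif zone == 4:
--         x, y = zone_readjust(p1, 7)
--         return [-x, y]
--     elif zone == 5:
--         x, y = zone_readjust(p1, 6)
--         return [-x, y]
--     elif zone == 6:
--         x, y = zone_readjust(p1, 7)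
--         return [-y, -x]
--     elif zone == 7:
--         return [p1[0], -p1[1]]
--     return p1
-- ===== SOURCE B (Python) =====
-- def zone_readjust(p1, zone):
--     if not (1 <= zone <= 7):
--         return p1
--     x, y = p1[0], p1[1]
--     table = {
--         1: [y, x],
--         2: [-y, x],
--         3: [-x, y],
--         4: [-x, -y],
--         5: [-y, -x],
--         6: [y, -x],
--         7: [x, -y],
--     }
--     return table[zone]
-- ===== Notes on version B (the rewrite author's own statement) =====
-- stated objective: simpler
-- what changed: Replaced the chain of self-recursive calls by a single flat table mapping each zone 1-7 to its fully-computed coordinate pair, with a range guard returning p1 for any other zone.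
import Mathlib
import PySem

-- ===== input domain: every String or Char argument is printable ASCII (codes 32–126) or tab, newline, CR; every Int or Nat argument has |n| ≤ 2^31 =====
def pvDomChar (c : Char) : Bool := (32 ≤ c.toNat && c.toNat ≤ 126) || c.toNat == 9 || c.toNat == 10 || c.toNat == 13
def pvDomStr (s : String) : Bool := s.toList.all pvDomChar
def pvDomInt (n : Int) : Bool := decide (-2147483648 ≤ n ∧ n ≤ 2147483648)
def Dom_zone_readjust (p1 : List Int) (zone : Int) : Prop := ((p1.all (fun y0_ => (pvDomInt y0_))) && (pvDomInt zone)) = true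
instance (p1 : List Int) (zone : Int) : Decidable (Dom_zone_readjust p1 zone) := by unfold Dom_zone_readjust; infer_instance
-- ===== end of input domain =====

-- B replaces A's self-recursive zone chain with a flat dict lookup of fully-computed coordinate pairs (objective: simpler).


-- ===== PORT A =====
-- rank used only for termination of the literal transliteration of A's recursion (2→1, 4→7, 5→6, 6→7)
def zrank (zone : Int) : Nat := if zone = 5 then 2 else if zone = 2 ∨ zone = 4 ∨ zone = 6 then 1 else 0

-- Literal port of A. p1[i] is PySem.List.pyGet?; the .getD 0 default is only reached where
-- Python raises IndexError (len(p1) < 2 with zone in 1..7), which Pre_ excludes.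
-- Python's 'x, y = <recursive call>' is the two-element destructuring match.
def zone_readjust (p1 : List Int) (zone : Int) : List Int :=
  if zone = 1 then [(PySem.List.pyGet? p1 1).getD 0, (PySem.List.pyGet? p1 0).getD 0]
  else if zone = 2 then
    match zone_readjust p1 1 with
    | x :: y :: _ => [-x, y]
    | _ => p1
  else if zone = 3 then [-(PySem.List.pyGet? p1 0).getD 0, (PySem.List.pyGet? p1 1).getD 0]
  else if zone = 4 then
    match zone_readjust p1 7 with
    | x :: y :: _ => [-x, y]
    | _ => p1
  else if zone = 5 then
    match zone_readjust p1 6 with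
    | x :: y :: _ => [-x, y]
    | _ => p1
  else if zone = 6 then
    match zone_readjust p1 7 with
    | x :: y :: _ => [-y, -x]
    | _ => p1
  else if zone = 7 then [(PySem.List.pyGet? p1 0).getD 0, -(PySem.List.pyGet? p1 1).getD 0]
  else p1
termination_by zrank zone
decreasing_by all_goals subst_vars; simp [zrank]

-- ===== PORT B =====
-- Literal port of Source B: range guard, then one flat dict from zone to the computed pair.
-- table[zone] cannot miss inside the guard, so the .getD p1 default is unreachable there.
def zone_readjust_alt (p1 : List Int) (zone : Int) : List Int :=
  if ¬ (1 ≤ zone ∧ zone ≤ 7) then p1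
  else
    let x := (PySem.List.pyGet? p1 0).getD 0
    let y := (PySem.List.pyGet? p1 1).getD 0
    let table : PySem.Dict Int (List Int) :=
      PySem.Dict.ofList [(1, [y, x]), (2, [-y, x]), (3, [-x, y]), (4, [-x, -y]),
                         (5, [-y, -x]), (6, [y, -x]), (7, [x, -y])]
    (table.get? zone).getD p1

-- ===== PRECONDITION & SPEC =====
-- For zone in 1..7 both Pythons index p1[0]/p1[1] (IndexError when len(p1) < 2); Pre_ excludes exactly that.
def Pre_zone_readjust (p1 : List Int) (zone : Int) : Prop :=
  (1 ≤ zone ∧ zone ≤ 7) → 2 ≤ p1.length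
instance (p1 : List Int) (zone : Int) : Decidable (Pre_zone_readjust p1 zone) := by unfold Pre_zone_readjust; infer_instance
def pvWitness_zone_readjust : List Int × Int := ([3, 4], 2)

def Spec_zone_readjust (p1 : List Int) (zone : Int) (out : List Int) : Prop := out = zone_readjust_alt p1 zone
instance (p1 : List Int) (zone : Int) (out : List Int) : Decidable (Spec_zone_readjust p1 zone out) := by unfold Spec_zone_readjust; infer_instance

-- ===== CLAIM (what is proved, stated in full; the proofs are below) =====
def Claim_equal_zone_readjust : Prop := ∀ (p1 : List Int) (zone : Int), Dom_zone_readjust p1 zone → Pre_zone_readjust p1 zone → Spec_zone_readjust p1 zone (zone_readjust p1 zone)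

-- ===== LEMMAS AND PROOFS =====

-- ===== VERDICT (by name: the statement is the Claim_ definition above) =====
theorem zone_readjust_spec : Claim_equal_zone_readjust := by
  intro p1 zone _ hpre
  unfold Spec_zone_readjust
  by_cases hz : 1 ≤ zone ∧ zone ≤ 7
  · obtain ⟨a, b, t, rfl⟩ : ∃ a b t, p1 = a :: b :: t := by
      match p1, hpre hz with
      | a :: b :: t, _ => exact ⟨a, b, t, rfl⟩
    obtain ⟨h1, h2⟩ := hz
    interval_cases zone <;>
      simp [zone_readjust, zone_readjust_alt, PySem.List.pyGet?, PySem.List.pyIdx?,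
            PySem.Dict.ofList, PySem.Dict.get?, PySem.Dict.update, PySem.Dict.empty, PySem.Dict.insert, show (0:Int) ≤ (t.length:Int) + 1 by positivity]
  · have h1 : zone ≠ 1 := by omega
    have h2 : zone ≠ 2 := by omega
    have h3 : zone ≠ 3 := by omega
    have h4 : zone ≠ 4 := by omega
    have h5 : zone ≠ 5 := by omega
    have h6 : zone ≠ 6 := by omega
    have h7 : zone ≠ 7 := by omega
    simp [zone_readjust, zone_readjust_alt, h1, h2, h3, h4, h5, h6, h7, hz]
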